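-- pv_equiv track=rewrite | github.com/saltsami/suomivillage | koivulahti/services/engine/app/runner.py | appraise_ambient
-- ===== SOURCE A (Python) =====
-- from typing import Any, Dict, List, Optional
--
-- APPRAISAL_MATRIX: Dict[str, Dict[str, tuple]] = {
--     "weather_snow": {
--         "romantic": ("POST_FEED", "Lunta sataa. Onpa kaunista ulkona."),
--         "practical": ("POST_FEED", "Ja taas lumityöt. Ei voi mitään."),
--         "anxious": ("POST_CHAT", "Liukasta on. Varokaa teillä!"),
--         "stoic": ("IGNORE", None),
--         "gossip": ("POST_CHAT", "Kuulin että lumimyrsky tulossa? Mitäs muut?"),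
--         "default": ("POST_FEED", "Lunta sataa. Talvi täällä."),
--     },
--     "weather_rain": {
--         "romantic": ("POST_FEED", "Sade on melankolista. Kaunista silti."),
--         "practical": ("POST_FEED", "Vesisadetta. Sateenvarjo mukaan."),
--         "anxious": ("POST_CHAT", "Vettä tulee. Onkohan kaikilla kumisaappaat?"),
--         "stoic": ("IGNORE", None),
--         "default": ("POST_FEED", "Sataa vettä. Normaali päivä."),
--     },
--     "weather_sunny": {
--         "romantic": ("POST_FEED", "Aurinko paistaa! Kaunis päivä edessä."),
--         "practical": ("POST_FEED", "Hyvä keli. Hommiin vaan."),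
--         "social": ("POST_CHAT", "Onpa keli! Mennäänkö ulos?"),
--         "stoic": ("IGNORE", None),
--         "default": ("POST_FEED", "Aurinkoista. Hyvä päivä."),
--     },
--     "weather_storm": {
--         "anxious": ("POST_CHAT", "Myrsky tulossa! Olkaa varovaisia!"),
--         "practical": ("POST_FEED", "Myrsky lähestyy. Kannattaa pysyä sisällä."),
--         "stoic": ("POST_FEED", "Myrsky menee ohi. Ei hätää."),
--         "default": ("POST_FEED", "Myrsky tulossa. Varautukaa."),
--     },
--     "news_suomi": {
--         "political": ("POST_FEED", "Taas näitä päätöksiä. Mitähän seuraavaksi."),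
--         "gossip": ("POST_CHAT", "Kuulitteko uutiset? Mitä mieltä olette?"),
--         "anxious": ("POST_CHAT", "Huolestuttavia uutisia. Toivottavasti menee hyvin."),
--         "stoic": ("IGNORE", None),
--         "default": ("IGNORE", None),
--     },
--     "news_talous": {
--         "practical": ("POST_FEED", "Talous taas otsikoissa. Katsotaan miten käy."),
--         "anxious": ("POST_CHAT", "Hinnat nousee. Miten te selviätte?"),
--         "stoic": ("IGNORE", None),
--         "default": ("IGNORE", None),
--     },
--     "news_paikallinen": {
--         "social": ("POST_FEED", "Kuulin paikallisia uutisia. Mielenkiintoista!"),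
--         "gossip": ("POST_CHAT", "Arvatkaa mitä kuulin! Kylällä tapahtuu."),
--         "default": ("POST_FEED", "Paikkakunnalla tapahtuu."),
--     },
--     "sports_jääkiekko": {
--         "social": ("POST_FEED", "Leijonat pelasi! Hyvä Suomi!"),
--         "stoic": ("IGNORE", None),
--         "default": ("POST_CHAT", "Näittekö pelin? Meni hyvin!"),
--     },
--     "sports_jalkapallo": {
--         "social": ("POST_CHAT", "Hyvä peli! Mitä tykkäsitte?"),
--         "default": ("IGNORE", None),
--     },
-- }
--
-- def get_npc_archetype(npc_profile: Dict[str, Any]) -> str: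
--     """Extract primary archetype from NPC profile."""
--     archetypes = npc_profile.get("archetypes", [])
--     if archetypes:
--         return archetypes[0].lower()
--     return "default"
--
-- def appraise_ambient(topic: str, npc_profile: Dict[str, Any]) -> tuple:
--     """Determine NPC's intent based on topic and personality. Returns (intent, draft)."""
--     archetype = get_npc_archetype(npc_profile)
--
--     # Try exact topic match first
--     if topic in APPRAISAL_MATRIX:
--         topic_responses = APPRAISAL_MATRIX[topic]
--         if archetype in topic_responses:
--             return topic_responses[archetype]
--         if "default" in topic_responses:
--             return topic_responses["default"]
--
--     # Try prefix match (e.g., "weather_" for any weather)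
--     for pattern, responses in APPRAISAL_MATRIX.items():
--         if topic.startswith(pattern.rsplit("_", 1)[0] + "_"):
--             if archetype in responses:
--                 return responses[archetype]
--             if "default" in responses:
--                 return responses["default"]
--
--     return ("IGNORE", None)
-- ===== SOURCE B (Python) =====
-- from typing import Any, Dict
--
-- # Flattened rule table: one row per (topic_key, archetype) instead of nested dicts.
-- # F/C are the two posting channels; IG is the "stay silent" response.
-- F, C = "POST_FEED", "POST_CHAT"
-- IG = ("IGNORE", None)
--
-- def _post(key, arch, chan, msg):
--     """Rule row: post `msg` on channel `chan` for (topic key, archetype)."""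
--     return (key, arch, (chan, msg))
--
-- def _quiet(key, arch):
--     """Rule row: stay silent for (topic key, archetype)."""
--     return (key, arch, IG)
--
-- _RULES = [
--     _post("weather_snow", "romantic", F, "Lunta sataa. Onpa kaunista ulkona."),
--     _post("weather_snow", "practical", F, "Ja taas lumityöt. Ei voi mitään."),
--     _post("weather_snow", "anxious", C, "Liukasta on. Varokaa teillä!"),
--     _quiet("weather_snow", "stoic"),
--     _post("weather_snow", "gossip", C, "Kuulin että lumimyrsky tulossa? Mitäs muut?"),
--     _post("weather_snow", "default", F, "Lunta sataa. Talvi täällä."),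
--     _post("weather_rain", "romantic", F, "Sade on melankolista. Kaunista silti."),
--     _post("weather_rain", "practical", F, "Vesisadetta. Sateenvarjo mukaan."),
--     _post("weather_rain", "anxious", C, "Vettä tulee. Onkohan kaikilla kumisaappaat?"),
--     _quiet("weather_rain", "stoic"),
--     _post("weather_rain", "default", F, "Sataa vettä. Normaali päivä."),
--     _post("weather_sunny", "romantic", F, "Aurinko paistaa! Kaunis päivä edessä."),
--     _post("weather_sunny", "practical", F, "Hyvä keli. Hommiin vaan."),
--     _post("weather_sunny", "social", C, "Onpa keli! Mennäänkö ulos?"),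
--     _quiet("weather_sunny", "stoic"),
--     _post("weather_sunny", "default", F, "Aurinkoista. Hyvä päivä."),
--     _post("weather_storm", "anxious", C, "Myrsky tulossa! Olkaa varovaisia!"),
--     _post("weather_storm", "practical", F, "Myrsky lähestyy. Kannattaa pysyä sisällä."),
--     _post("weather_storm", "stoic", F, "Myrsky menee ohi. Ei hätää."),
--     _post("weather_storm", "default", F, "Myrsky tulossa. Varautukaa."),
--     _post("news_suomi", "political", F, "Taas näitä päätöksiä. Mitähän seuraavaksi."),
--     _post("news_suomi", "gossip", C, "Kuulitteko uutiset? Mitä mieltä olette?"),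
--     _post("news_suomi", "anxious", C, "Huolestuttavia uutisia. Toivottavasti menee hyvin."),
--     _quiet("news_suomi", "stoic"),
--     _quiet("news_suomi", "default"),
--     _post("news_talous", "practical", F, "Talous taas otsikoissa. Katsotaan miten käy."),
--     _post("news_talous", "anxious", C, "Hinnat nousee. Miten te selviätte?"),
--     _quiet("news_talous", "stoic"),
--     _quiet("news_talous", "default"),
--     _post("news_paikallinen", "social", F, "Kuulin paikallisia uutisia. Mielenkiintoista!"),
--     _post("news_paikallinen", "gossip", C, "Arvatkaa mitä kuulin! Kylällä tapahtuu."),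
--     _post("news_paikallinen", "default", F, "Paikkakunnalla tapahtuu."),
--     _post("sports_jääkiekko", "social", F, "Leijonat pelasi! Hyvä Suomi!"),
--     _quiet("sports_jääkiekko", "stoic"),
--     _post("sports_jääkiekko", "default", C, "Näittekö pelin? Meni hyvin!"),
--     _post("sports_jalkapallo", "social", C, "Hyvä peli! Mitä tykkäsitte?"),
--     _quiet("sports_jalkapallo", "default"),
-- ]
--
-- # Indexes compiled once from the rule rows: exact topic -> its rows, and
-- # first-underscore prefix -> the rows of the FIRST topic carrying that prefix.
-- _BY_TOPIC: Dict[str, Dict[str, tuple]] = {}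
-- for _key, _arch, _resp in _RULES:
--     _BY_TOPIC.setdefault(_key, {})[_arch] = _resp
-- _BY_PREFIX: Dict[str, Dict[str, tuple]] = {}
-- for _key, _d in _BY_TOPIC.items():
--     _BY_PREFIX.setdefault(_key[: _key.index("_") + 1], _d)
--
-- def _who(npc_profile: Dict[str, Any]) -> str:
--     """Primary archetype of the NPC, lower-cased; 'default' if none given."""
--     archetypes = npc_profile.get("archetypes") or []
--     return archetypes[0].lower() if archetypes else "default"
--
-- def appraise_ambient(topic: str, npc_profile: Dict[str, Any]) -> tuple:
--     """Determine NPC's intent based on topic and personality. Returns (intent, draft)."""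
--     who = _who(npc_profile)
--     rules = _BY_TOPIC.get(topic)
--     if rules is None and "_" in topic:
--         rules = _BY_PREFIX.get(topic[: topic.index("_") + 1])
--     if rules is None:
--         return IG
--     return rules.get(who, rules.get("default", IG))
-- ===== Notes on version B (the rewrite author's own statement) =====
-- stated objective: alternative
-- what changed: Replaces A's nested dict literal plus per-call startswith scan (recomputing each key's rsplit prefix every iteration) with a flat rule table compiled once at import into an exact-topic index and a first-underscore prefix index, so a call does at most two dict probes.
import Mathlib
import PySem

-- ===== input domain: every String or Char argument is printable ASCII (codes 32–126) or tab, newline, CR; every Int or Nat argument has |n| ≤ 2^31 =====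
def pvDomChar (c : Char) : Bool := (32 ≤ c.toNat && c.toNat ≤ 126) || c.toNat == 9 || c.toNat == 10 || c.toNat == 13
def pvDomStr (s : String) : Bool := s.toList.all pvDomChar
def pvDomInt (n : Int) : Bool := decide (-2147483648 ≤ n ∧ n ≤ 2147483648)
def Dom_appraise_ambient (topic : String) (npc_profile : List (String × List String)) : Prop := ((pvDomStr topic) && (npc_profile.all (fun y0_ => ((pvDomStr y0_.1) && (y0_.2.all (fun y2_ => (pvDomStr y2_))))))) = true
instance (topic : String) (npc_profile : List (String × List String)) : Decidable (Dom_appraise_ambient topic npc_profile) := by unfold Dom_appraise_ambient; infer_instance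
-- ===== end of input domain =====

-- B replaces A's nested dict literal + per-call startswith scan with a flat rule table
-- compiled once into an exact-topic index and a first-underscore prefix index
-- (objective: alternative data structure, two dict probes per call instead of a scan).

-- ===== PORT A =====

def R_weather_snow : PySem.Dict String (String × Option String) := PySem.Dict.mk [
  ("romantic", ("POST_FEED", some "Lunta sataa. Onpa kaunista ulkona.")),
  ("practical", ("POST_FEED", some "Ja taas lumityöt. Ei voi mitään.")),
  ("anxious", ("POST_CHAT", some "Liukasta on. Varokaa teillä!")),
  ("stoic", ("IGNORE", none)),
  ("gossip", ("POST_CHAT", some "Kuulin että lumimyrsky tulossa? Mitäs muut?")),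
  ("default", ("POST_FEED", some "Lunta sataa. Talvi täällä."))]

def R_weather_rain : PySem.Dict String (String × Option String) := PySem.Dict.mk [
  ("romantic", ("POST_FEED", some "Sade on melankolista. Kaunista silti.")),
  ("practical", ("POST_FEED", some "Vesisadetta. Sateenvarjo mukaan.")),
  ("anxious", ("POST_CHAT", some "Vettä tulee. Onkohan kaikilla kumisaappaat?")),
  ("stoic", ("IGNORE", none)),
  ("default", ("POST_FEED", some "Sataa vettä. Normaali päivä."))]

def R_weather_sunny : PySem.Dict String (String × Option String) := PySem.Dict.mk [
  ("romantic", ("POST_FEED", some "Aurinko paistaa! Kaunis päivä edessä.")),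
  ("practical", ("POST_FEED", some "Hyvä keli. Hommiin vaan.")),
  ("social", ("POST_CHAT", some "Onpa keli! Mennäänkö ulos?")),
  ("stoic", ("IGNORE", none)),
  ("default", ("POST_FEED", some "Aurinkoista. Hyvä päivä."))]

def R_weather_storm : PySem.Dict String (String × Option String) := PySem.Dict.mk [
  ("anxious", ("POST_CHAT", some "Myrsky tulossa! Olkaa varovaisia!")),
  ("practical", ("POST_FEED", some "Myrsky lähestyy. Kannattaa pysyä sisällä.")),
  ("stoic", ("POST_FEED", some "Myrsky menee ohi. Ei hätää.")),
  ("default", ("POST_FEED", some "Myrsky tulossa. Varautukaa."))]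

def R_news_suomi : PySem.Dict String (String × Option String) := PySem.Dict.mk [
  ("political", ("POST_FEED", some "Taas näitä päätöksiä. Mitähän seuraavaksi.")),
  ("gossip", ("POST_CHAT", some "Kuulitteko uutiset? Mitä mieltä olette?")),
  ("anxious", ("POST_CHAT", some "Huolestuttavia uutisia. Toivottavasti menee hyvin.")),
  ("stoic", ("IGNORE", none)),
  ("default", ("IGNORE", none))]

def R_news_talous : PySem.Dict String (String × Option String) := PySem.Dict.mk [
  ("practical", ("POST_FEED", some "Talous taas otsikoissa. Katsotaan miten käy.")),
  ("anxious", ("POST_CHAT", some "Hinnat nousee. Miten te selviätte?")),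
  ("stoic", ("IGNORE", none)),
  ("default", ("IGNORE", none))]

def R_news_paikallinen : PySem.Dict String (String × Option String) := PySem.Dict.mk [
  ("social", ("POST_FEED", some "Kuulin paikallisia uutisia. Mielenkiintoista!")),
  ("gossip", ("POST_CHAT", some "Arvatkaa mitä kuulin! Kylällä tapahtuu.")),
  ("default", ("POST_FEED", some "Paikkakunnalla tapahtuu."))]

def R_sports_jaakiekko : PySem.Dict String (String × Option String) := PySem.Dict.mk [
  ("social", ("POST_FEED", some "Leijonat pelasi! Hyvä Suomi!")),
  ("stoic", ("IGNORE", none)),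
  ("default", ("POST_CHAT", some "Näittekö pelin? Meni hyvin!"))]

def R_sports_jalkapallo : PySem.Dict String (String × Option String) := PySem.Dict.mk [
  ("social", ("POST_CHAT", some "Hyvä peli! Mitä tykkäsitte?")),
  ("default", ("IGNORE", none))]

def APPRAISAL_MATRIX : PySem.Dict String (PySem.Dict String (String × Option String)) := PySem.Dict.mk [
  ("weather_snow", R_weather_snow),
  ("weather_rain", R_weather_rain),
  ("weather_sunny", R_weather_sunny),
  ("weather_storm", R_weather_storm),
  ("news_suomi", R_news_suomi),
  ("news_talous", R_news_talous),
  ("news_paikallinen", R_news_paikallinen),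
  ("sports_jääkiekko", R_sports_jaakiekko),
  ("sports_jalkapallo", R_sports_jalkapallo)]

-- hand port of s.rsplit("_", 1)[0] + "_" (exact: part before the LAST '_', or all of s if none, then '_')
def pyRsplitLastPrefix (s : String) : String :=
  let i := PySem.Chars.rfind s.toList ['_']
  if i < 0 then String.ofList (s.toList ++ ['_'])
  else String.ofList (s.toList.take i.toNat ++ ['_'])

def get_npc_archetype (npc_profile : List (String × List String)) : String :=
  let archetypes := (PySem.Dict.mk npc_profile).getD "archetypes" []
  match archetypes with
  | a :: _ => PySem.Str.lower a
  | [] => "default"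

def appraise_ambient (topic : String) (npc_profile : List (String × List String)) : String × Option String :=
  let archetype := get_npc_archetype npc_profile
  -- exact-match branch (falls through to the scan when it returns nothing, as in Python)
  let exact : Option (String × Option String) :=
    match APPRAISAL_MATRIX.get? topic with
    | some topic_responses =>
      match topic_responses.get? archetype with
      | some r => some r
      | none => topic_responses.get? "default"
    | none => none
  match exact with
  | some r => r
  | none =>
    -- for pattern, responses in APPRAISAL_MATRIX.items(): first startswith hit that yields a value
    match APPRAISAL_MATRIX.items.findSome? (fun pr =>
        if PySem.Str.startswith topic (pyRsplitLastPrefix pr.1) then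
          match pr.2.get? archetype with
          | some r => some r
          | none => pr.2.get? "default"
        else none) with
    | some r => r
    | none => ("IGNORE", none)

-- ===== PORT B =====

abbrev BResp : Type := String × Option String

def bF : String := "POST_FEED"
def bC : String := "POST_CHAT"
def IG : BResp := ("IGNORE", none)

-- row builders for the flat rule table: a posting rule and a stay-silent rule
def bRow (key arch chan msg : String) : String × String × BResp :=
  ⟨key, arch, chan, some msg⟩
def bIg (key arch : String) : String × String × BResp :=
  ⟨key, arch, IG⟩

-- flat rule table: one row per (topic_key, archetype, response)
def B_RULES : List (String × String × BResp) := [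
  bRow "weather_snow" "romantic" bF "Lunta sataa. Onpa kaunista ulkona.",
  bRow "weather_snow" "practical" bF "Ja taas lumityöt. Ei voi mitään.",
  bRow "weather_snow" "anxious" bC "Liukasta on. Varokaa teillä!",
  bIg "weather_snow" "stoic",
  bRow "weather_snow" "gossip" bC "Kuulin että lumimyrsky tulossa? Mitäs muut?",
  bRow "weather_snow" "default" bF "Lunta sataa. Talvi täällä.",
  bRow "weather_rain" "romantic" bF "Sade on melankolista. Kaunista silti.",
  bRow "weather_rain" "practical" bF "Vesisadetta. Sateenvarjo mukaan.",
  bRow "weather_rain" "anxious" bC "Vettä tulee. Onkohan kaikilla kumisaappaat?",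
  bIg "weather_rain" "stoic",
  bRow "weather_rain" "default" bF "Sataa vettä. Normaali päivä.",
  bRow "weather_sunny" "romantic" bF "Aurinko paistaa! Kaunis päivä edessä.",
  bRow "weather_sunny" "practical" bF "Hyvä keli. Hommiin vaan.",
  bRow "weather_sunny" "social" bC "Onpa keli! Mennäänkö ulos?",
  bIg "weather_sunny" "stoic",
  bRow "weather_sunny" "default" bF "Aurinkoista. Hyvä päivä.",
  bRow "weather_storm" "anxious" bC "Myrsky tulossa! Olkaa varovaisia!",
  bRow "weather_storm" "practical" bF "Myrsky lähestyy. Kannattaa pysyä sisällä.",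
  bRow "weather_storm" "stoic" bF "Myrsky menee ohi. Ei hätää.",
  bRow "weather_storm" "default" bF "Myrsky tulossa. Varautukaa.",
  bRow "news_suomi" "political" bF "Taas näitä päätöksiä. Mitähän seuraavaksi.",
  bRow "news_suomi" "gossip" bC "Kuulitteko uutiset? Mitä mieltä olette?",
  bRow "news_suomi" "anxious" bC "Huolestuttavia uutisia. Toivottavasti menee hyvin.",
  bIg "news_suomi" "stoic",
  bIg "news_suomi" "default",
  bRow "news_talous" "practical" bF "Talous taas otsikoissa. Katsotaan miten käy.",
  bRow "news_talous" "anxious" bC "Hinnat nousee. Miten te selviätte?",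
  bIg "news_talous" "stoic",
  bIg "news_talous" "default",
  bRow "news_paikallinen" "social" bF "Kuulin paikallisia uutisia. Mielenkiintoista!",
  bRow "news_paikallinen" "gossip" bC "Arvatkaa mitä kuulin! Kylällä tapahtuu.",
  bRow "news_paikallinen" "default" bF "Paikkakunnalla tapahtuu.",
  bRow "sports_jääkiekko" "social" bF "Leijonat pelasi! Hyvä Suomi!",
  bIg "sports_jääkiekko" "stoic",
  bRow "sports_jääkiekko" "default" bC "Näittekö pelin? Meni hyvin!",
  bRow "sports_jalkapallo" "social" bC "Hyvä peli! Mitä tykkäsitte?",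
  bIg "sports_jalkapallo" "default"]

-- _BY_TOPIC.setdefault(key, {})[arch] = resp  ==  d[key] = d.get(key, {}) with arch set
def B_BY_TOPIC : PySem.Dict String (PySem.Dict String BResp) :=
  B_RULES.foldl
    (fun d row => d.modify row.1 (PySem.Dict.mk []) (fun inner => inner.insert row.2.1 row.2.2))
    (PySem.Dict.mk [])

-- _BY_PREFIX.setdefault(key[: key.index("_") + 1], d)  (every rule key contains "_", so index = find)
def B_BY_PREFIX : PySem.Dict String (PySem.Dict String BResp) :=
  B_BY_TOPIC.items.foldl
    (fun d kd => d.setdefault (PySem.Str.slice kd.1 none (some (PySem.Str.find kd.1 "_" + 1))) kd.2)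
    (PySem.Dict.mk [])

-- npc_profile.get("archetypes") or [] : None and [] both yield []
def bWho (npc_profile : List (String × List String)) : String :=
  let archetypes := (PySem.Dict.mk npc_profile).getD "archetypes" []
  match archetypes with
  | a :: _ => PySem.Str.lower a
  | [] => "default"

def appraise_ambient_alt (topic : String) (npc_profile : List (String × List String)) : String × Option String :=
  let who := bWho npc_profile
  let rules : Option (PySem.Dict String BResp) :=
    match B_BY_TOPIC.get? topic with
    | some d => some d
    | none =>
      if PySem.Str.isIn "_" topic then
        -- topic[: topic.index("_") + 1] ; index = find under the isIn guard
        B_BY_PREFIX.get? (PySem.Str.slice topic none (some (PySem.Str.find topic "_" + 1)))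
      else none
  match rules with
  | none => IG
  | some r => r.getD who (r.getD "default" IG)

-- ===== PRECONDITION & SPEC =====
def Spec_appraise_ambient (topic : String) (npc_profile : List (String × List String)) (out : String × Option String) : Prop := out = appraise_ambient_alt topic npc_profile
instance (topic : String) (npc_profile : List (String × List String)) (out : String × Option String) : Decidable (Spec_appraise_ambient topic npc_profile out) := by unfold Spec_appraise_ambient; infer_instance

-- ===== CLAIM (what is proved, stated in full; the proofs are below) =====
def Claim_equal_appraise_ambient : Prop := ∀ (topic : String) (npc_profile : List (String × List String)), Dom_appraise_ambient topic npc_profile → Spec_appraise_ambient topic npc_profile (appraise_ambient topic npc_profile)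

-- ===== LEMMAS AND PROOFS =====

theorem singleton_prefix_iff (c : Char) (l : List Char) : [c] <+: l ↔ l.head? = some c := by
  cases l with
  | nil => simp
  | cons a l => simp [List.cons_prefix_iff, eq_comm]

theorem startswith_prefix_char (t q : List Char) (hq : '_' ∉ q) :
    PySem.Chars.startswith t (q ++ ['_']) = true ↔
      0 ≤ PySem.Chars.find t ['_'] ∧
        t.take ((PySem.Chars.find t ['_']).toNat + 1) = q ++ ['_'] := by
  rw [PySem.Chars.startswith_iff]
  constructor
  · rintro ⟨r, rfl⟩
    have hpos : 0 ≤ PySem.Chars.find (q ++ ['_'] ++ r) ['_'] := by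
      rw [PySem.Chars.find_nonneg_iff]
      exact ⟨q, r, by simp⟩
    obtain ⟨hpre, hmin⟩ := PySem.Chars.find_spec hpos
    set m := (PySem.Chars.find (q ++ ['_'] ++ r) ['_']).toNat with hm
    have hm_le : m ≤ q.length := by
      by_contra h'
      push Not at h'
      exact hmin q.length h' (by simp)
    have hm_eq : m = q.length := by
      rcases lt_or_eq_of_le hm_le with h' | h'
      · exfalso
        rw [singleton_prefix_iff, List.head?_drop] at hpre
        rw [List.append_assoc, List.getElem?_append_left h'] at hpre
        have : q[m]'h' = '_' := by
          have := List.getElem?_eq_getElem h' ▸ hpre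
          simpa using this
        exact hq (this ▸ List.getElem_mem h')
      · exact h'
    refine ⟨hpos, ?_⟩
    rw [hm_eq]
    rw [show q.length + 1 = (q ++ ['_']).length by simp]
    exact List.take_left
  · rintro ⟨hpos, htake⟩
    rw [← htake]
    exact List.take_prefix _ _

theorem str_toList_inj (s t : String) (h : s.toList = t.toList) : s = t := by
  have := congrArg String.ofList h
  simpa using this

theorem isIn_underscore_iff (t : List Char) :
    PySem.Chars.isIn ['_'] t = true ↔ 0 ≤ PySem.Chars.find t ['_'] := by
  rw [PySem.Chars.isIn_iff_infix, PySem.Chars.find_nonneg_iff]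

-- A's exact/first-hit branch equals B's nested getD when "default" is present
theorem exact_branch (R : PySem.Dict String (String × Option String)) (arch : String)
    (d : String × Option String) (hd : R.get? "default" = some d) (fb : String × Option String) :
    (match (match R.get? arch with | some r => some r | none => R.get? "default") with
      | some r => r | none => fb)
    = R.getD arch (R.getD "default" IG) := by
  rw [PySem.Dict.getD_eq_get?_getD, PySem.Dict.getD_eq_get?_getD, hd]
  cases h : R.get? arch <;> simp_all

-- the compiled indexes, as literals (closed computation)
set_option maxRecDepth 100000 in
theorem bytopic_eq : B_BY_TOPIC = APPRAISAL_MATRIX := by decide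

set_option maxRecDepth 100000 in
theorem byprefix_eq : B_BY_PREFIX = PySem.Dict.mk [
    ("weather_", R_weather_snow), ("news_", R_news_suomi), ("sports_", R_sports_jaakiekko)] := by
  decide

-- ===== VERDICT (by name: the statement is the Claim_ definition above) =====
set_option maxRecDepth 2000000 in
theorem appraise_ambient_spec : Claim_equal_appraise_ambient := by
  intro topic npc _
  unfold Spec_appraise_ambient
  unfold appraise_ambient appraise_ambient_alt
  rw [bytopic_eq]
  have hbw : bWho = get_npc_archetype := by
    funext p
    unfold bWho get_npc_archetype
    rfl
  rw [hbw]
  generalize get_npc_archetype npc = arch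
  have hfind : PySem.Str.find topic "_" = PySem.Chars.find topic.toList ['_'] := by simp
  have hguard : PySem.Str.isIn "_" topic = (decide (0 ≤ PySem.Chars.find topic.toList ['_'])) := by
    rw [show PySem.Str.isIn "_" topic = PySem.Chars.isIn ['_'] topic.toList from by
      simpa using PySem.Str.isIn_eq "_" topic]
    by_cases h : 0 ≤ PySem.Chars.find topic.toList ['_']
    · simp [h, (isIn_underscore_iff topic.toList).mpr h]
    · simp only [h, decide_false]
      by_contra hne
      simp only [Bool.not_eq_false] at hne
      exact h ((isIn_underscore_iff topic.toList).mp hne)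
  cases hx : APPRAISAL_MATRIX.get? topic with
  | some tr =>
    revert hx
    unfold APPRAISAL_MATRIX
    simp only [PySem.Dict.get?_mk_cons]
    split_ifs <;> intro hx <;> cases hx <;>
      exact exact_branch _ _ _ (by exact rfl) _
  | none =>
    simp only []
    rw [show APPRAISAL_MATRIX.items = [("weather_snow", R_weather_snow),
      ("weather_rain", R_weather_rain), ("weather_sunny", R_weather_sunny),
      ("weather_storm", R_weather_storm), ("news_suomi", R_news_suomi),
      ("news_talous", R_news_talous), ("news_paikallinen", R_news_paikallinen),
      ("sports_jääkiekko", R_sports_jaakiekko), ("sports_jalkapallo", R_sports_jalkapallo)] from rfl]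
    simp only [List.findSome?_cons, List.findSome?_nil]
    rw [show pyRsplitLastPrefix "weather_snow" = "weather_" from by decide,
        show pyRsplitLastPrefix "weather_rain" = "weather_" from by decide,
        show pyRsplitLastPrefix "weather_sunny" = "weather_" from by decide,
        show pyRsplitLastPrefix "weather_storm" = "weather_" from by decide,
        show pyRsplitLastPrefix "news_suomi" = "news_" from by decide,
        show pyRsplitLastPrefix "news_talous" = "news_" from by decide,
        show pyRsplitLastPrefix "news_paikallinen" = "news_" from by decide,
        show pyRsplitLastPrefix "sports_jääkiekko" = "sports_" from by decide,
        show pyRsplitLastPrefix "sports_jalkapallo" = "sports_" from by decide]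
    have hbr : ∀ (q : List Char) (p : String), p.toList = q ++ ['_'] → '_' ∉ q →
        (PySem.Str.startswith topic p = true ↔ 0 ≤ PySem.Chars.find topic.toList ['_'] ∧
          topic.toList.take ((PySem.Chars.find topic.toList ['_']).toNat + 1) = p.toList) := by
      intro q p hp hq
      rw [show PySem.Str.startswith topic p = PySem.Chars.startswith topic.toList p.toList from by simp, hp]
      exact startswith_prefix_char _ _ hq
    have hW := hbr "weather".toList "weather_" (by decide) (by decide)
    have hN := hbr "news".toList "news_" (by decide) (by decide)
    have hS := hbr "sports".toList "sports_" (by decide) (by decide)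
    have hkey : 0 ≤ PySem.Chars.find topic.toList ['_'] →
        (PySem.Str.slice topic none (some (PySem.Str.find topic "_" + 1))).toList
          = topic.toList.take ((PySem.Chars.find topic.toList ['_']).toNat + 1) := by
      intro h
      rw [show (PySem.Str.slice topic none (some (PySem.Str.find topic "_" + 1))).toList
          = PySem.List.slice topic.toList none (some (PySem.Str.find topic "_" + 1)) from by simp]
      rw [hfind]
      rw [show PySem.Chars.find topic.toList ['_'] + 1
          = (((PySem.Chars.find topic.toList ['_']).toNat + 1 : Nat) : Int) from by omega]
      rw [PySem.List.slice_to_natCast]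
    by_cases hw : PySem.Str.startswith topic "weather_" = true
    · obtain ⟨hpos, htake⟩ := hW.mp hw
      have hk : PySem.Str.slice topic none (some (PySem.Str.find topic "_" + 1)) = "weather_" := by
        apply str_toList_inj
        rw [hkey hpos, htake]
      obtain ⟨v, hv⟩ : ∃ v, (match R_weather_snow.get? arch with
          | some r => some r | none => R_weather_snow.get? "default") = some v := by
        cases h : R_weather_snow.get? arch
        · exact ⟨_, rfl⟩
        · exact ⟨_, rfl⟩
      simp only [hw, if_true, hv, hguard, hpos, decide_true, if_true, hk, byprefix_eq,
        show (PySem.Dict.mk [("weather_", R_weather_snow), ("news_", R_news_suomi),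
          ("sports_", R_sports_jaakiekko)]).get? "weather_" = some R_weather_snow from by decide]
      rw [← exact_branch R_weather_snow arch _ rfl ("IGNORE", none), hv]
    · simp only [Bool.not_eq_true] at hw
      by_cases hn : PySem.Str.startswith topic "news_" = true
      · obtain ⟨hpos, htake⟩ := hN.mp hn
        have hk : PySem.Str.slice topic none (some (PySem.Str.find topic "_" + 1)) = "news_" := by
          apply str_toList_inj
          rw [hkey hpos, htake]
        obtain ⟨v, hv⟩ : ∃ v, (match R_news_suomi.get? arch with
            | some r => some r | none => R_news_suomi.get? "default") = some v := by
          cases h : R_news_suomi.get? arch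
          · exact ⟨_, rfl⟩
          · exact ⟨_, rfl⟩
        simp only [hw, Bool.false_eq_true, if_false, hn, if_true, hv, hguard, hpos,
          decide_true, hk, byprefix_eq,
          show (PySem.Dict.mk [("weather_", R_weather_snow), ("news_", R_news_suomi),
            ("sports_", R_sports_jaakiekko)]).get? "news_" = some R_news_suomi from by decide]
        rw [← exact_branch R_news_suomi arch _ rfl ("IGNORE", none), hv]
      · simp only [Bool.not_eq_true] at hn
        by_cases hs : PySem.Str.startswith topic "sports_" = true
        · obtain ⟨hpos, htake⟩ := hS.mp hs
          have hk : PySem.Str.slice topic none (some (PySem.Str.find topic "_" + 1)) = "sports_" := by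
            apply str_toList_inj
            rw [hkey hpos, htake]
          obtain ⟨v, hv⟩ : ∃ v, (match R_sports_jaakiekko.get? arch with
              | some r => some r | none => R_sports_jaakiekko.get? "default") = some v := by
            cases h : R_sports_jaakiekko.get? arch
            · exact ⟨_, rfl⟩
            · exact ⟨_, rfl⟩
          simp only [hw, hn, Bool.false_eq_true, if_false, hs, if_true, hv, hguard, hpos,
            decide_true, hk, byprefix_eq,
            show (PySem.Dict.mk [("weather_", R_weather_snow), ("news_", R_news_suomi),
              ("sports_", R_sports_jaakiekko)]).get? "sports_" = some R_sports_jaakiekko from by decide]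
          rw [← exact_branch R_sports_jaakiekko arch _ rfl ("IGNORE", none), hv]
        · simp only [Bool.not_eq_true] at hs
          by_cases hpos : 0 ≤ PySem.Chars.find topic.toList ['_']
          · have hnone : (PySem.Dict.mk [("weather_", R_weather_snow), ("news_", R_news_suomi),
                ("sports_", R_sports_jaakiekko)]).get?
                (PySem.Str.slice topic none (some (PySem.Str.find topic "_" + 1))) = none := by
              have hne : ∀ (p : String) (q : List Char), p.toList = q ++ ['_'] → '_' ∉ q →
                  PySem.Str.startswith topic p = false →
                  ¬ (p = PySem.Str.slice topic none (some (PySem.Str.find topic "_" + 1))) := by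
                intro p q hp hq hfalse heq
                have : PySem.Str.startswith topic p = true := by
                  rw [hbr q p hp hq]
                  exact ⟨hpos, by rw [← hkey hpos, ← heq]⟩
                rw [hfalse] at this
                exact absurd this (by decide)
              simp only [PySem.Dict.get?_mk_cons, beq_iff_eq]
              rw [if_neg (hne "weather_" "weather".toList (by decide) (by decide) hw),
                  if_neg (hne "news_" "news".toList (by decide) (by decide) hn),
                  if_neg (hne "sports_" "sports".toList (by decide) (by decide) hs)]
              rfl
            simp only [hw, hn, hs, Bool.false_eq_true, if_false, hguard, hpos, decide_true,
              if_true, byprefix_eq, hnone]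
            rfl
          · simp only [hw, hn, hs, Bool.false_eq_true, if_false, hguard, hpos, decide_false]
            rfl
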